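-- pv_equiv track=rewrite | github.com/SOM-Research/metaScience | extractor-v2/add_abstract.py | get_paper_abstract
-- ===== SOURCE A (Python) =====
-- def get_paper_abstract(list):
--     abstract = ""
--     in_abstract = False
--     for e in list:
--         if e.startswith("#!"):
--             abstract = e.replace("#!", "")
--             in_abstract = True
--         else:
--             if in_abstract:
--                 abstract += e
--
--     return abstract
-- ===== SOURCE B (Python) =====
-- def get_paper_abstract(list):
--     last = None
--     for i, e in enumerate(list):
--         if e.startswith("#!"):
--             last = i
--     if last is None:
--         return ""
--     return list[last].replace("#!", "") + "".join(list[last + 1:])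
-- ===== Notes on version B (the rewrite author's own statement) =====
-- stated objective: alternative
-- what changed: Replaces the stateful in_abstract/accumulator single pass with a locate-then-build decomposition: find the index of the last '#!'-tagged line, then return that line cleaned plus the join of everything after it.
import Mathlib
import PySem

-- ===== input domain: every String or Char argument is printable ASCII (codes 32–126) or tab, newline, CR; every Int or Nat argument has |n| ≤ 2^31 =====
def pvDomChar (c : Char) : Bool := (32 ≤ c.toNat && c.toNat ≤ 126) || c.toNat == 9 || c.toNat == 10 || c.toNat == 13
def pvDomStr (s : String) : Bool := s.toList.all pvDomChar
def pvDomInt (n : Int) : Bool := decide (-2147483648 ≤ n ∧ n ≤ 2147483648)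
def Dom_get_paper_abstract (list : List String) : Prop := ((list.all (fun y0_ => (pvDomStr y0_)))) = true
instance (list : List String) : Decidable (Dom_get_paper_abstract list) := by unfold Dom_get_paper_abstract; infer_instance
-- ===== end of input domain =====

-- B replaces A's stateful flag/accumulator pass by locate-the-last-marker-then-build (alternative decomposition; same cost).

-- ===== PORT A =====
-- literal transliteration of A: fold carrying (abstract, in_abstract)
def get_paper_abstract (list : List String) : String :=
  (list.foldl
    (fun (st : String × Bool) e =>
      if PySem.Str.startswith e "#!" then (PySem.Str.replace e "#!" "", true)
      else if st.2 then (st.1 ++ e, st.2) else st)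
    ("", false)).1

-- ===== PORT B =====
-- literal transliteration of B: forward enumerate loop tracking the last marker index, then build
def get_paper_abstract_alt (list : List String) : String :=
  let last : Option Int :=
    (PySem.List.enumerate list 0).foldl
      (fun (acc : Option Int) p => if PySem.Str.startswith p.2 "#!" then some p.1 else acc) none
  match last with
  | none => ""
  | some i =>
      PySem.Str.replace ((PySem.List.pyGet? list i).getD "") "#!" ""
        ++ PySem.Str.join "" (PySem.List.slice list (some (i + 1)) none)

-- ===== PRECONDITION & SPEC =====
def Spec_get_paper_abstract (list : List String) (out : String) : Prop := out = get_paper_abstract_alt list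
instance (list : List String) (out : String) : Decidable (Spec_get_paper_abstract list out) := by unfold Spec_get_paper_abstract; infer_instance

-- ===== CLAIM (what is proved, stated in full; the proofs are below) =====
def Claim_equal_get_paper_abstract : Prop := ∀ (list : List String), Dom_get_paper_abstract list → Spec_get_paper_abstract list (get_paper_abstract list)

-- ===== LEMMAS AND PROOFS =====

-- recursive characterisation of "index of the last element starting with #!"
def pvLastRec : List String → Option Nat
  | [] => none
  | h :: t =>
    match pvLastRec t with
    | some j => some (j + 1)
    | none => if PySem.Str.startswith h "#!" then some 0 else none

theorem pvLastRec_lt : ∀ (l : List String) (j : Nat), pvLastRec l = some j → j < l.length := by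
  intro l
  induction l with
  | nil => intro j h; simp [pvLastRec] at h
  | cons h t ih =>
    intro j hj
    simp only [pvLastRec] at hj
    cases ht : pvLastRec t with
    | some k => rw [ht] at hj; simp at hj; have := ih k ht; simp [← hj]; omega
    | none =>
      rw [ht] at hj
      by_cases hs : PySem.Str.startswith h "#!" = true
      · rw [if_pos hs] at hj; simp at hj; simp [← hj]
      · rw [if_neg hs] at hj; simp at hj

-- B's enumerate-fold computes pvLastRec (shifted by the start offset)
theorem pvEnumFold (l : List String) : ∀ (k : Int) (a : Option Int),
    (PySem.List.enumerate l k).foldl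
      (fun (acc : Option Int) p => if PySem.Str.startswith p.2 "#!" then some p.1 else acc) a
    = match pvLastRec l with
      | some j => some (k + j)
      | none => a := by
  induction l with
  | nil => intro k a; simp [PySem.List.enumerate_nil, pvLastRec]
  | cons h t ih =>
    intro k a
    rw [PySem.List.enumerate_cons]
    simp only [List.foldl_cons]
    rw [ih (k + 1)]
    cases ht : pvLastRec t with
    | some j => simp [pvLastRec, ht]; ring
    | none =>
      by_cases hs : PySem.Str.startswith h "#!" = true
      · have hs' : PySem.Chars.startswith h.toList ['#', '!'] = true := by simpa using hs
        simp [pvLastRec, ht, hs']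
      · have hs' : ¬ PySem.Chars.startswith h.toList ['#', '!'] = true := by simpa using hs
        simp [pvLastRec, ht, hs']

-- "".join at String level, one step
theorem pvJoinCons (h : String) (t : List String) :
    PySem.Str.join "" (h :: t) = h ++ PySem.Str.join "" t := by
  cases t with
  | nil => apply String.ext; simp [PySem.Str.join, PySem.Chars.join_singleton, PySem.Chars.join_nil]
  | cons b r =>
    apply String.ext
    simp [PySem.Str.join, PySem.Chars.join_cons_cons]

-- A's fold characterised by pvLastRec
theorem pvMain : ∀ (l : List String) (abs : String) (flag : Bool),
    (l.foldl
      (fun (st : String × Bool) e =>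
        if PySem.Str.startswith e "#!" then (PySem.Str.replace e "#!" "", true)
        else if st.2 then (st.1 ++ e, st.2) else st)
      (abs, flag)).1
    = match pvLastRec l with
      | none => if flag then abs ++ PySem.Str.join "" l else abs
      | some j => PySem.Str.replace (l.getD j "") "#!" ""
          ++ PySem.Str.join "" (l.drop (j + 1)) := by
  intro l
  induction l with
  | nil =>
    intro abs flag
    cases flag <;> simp [pvLastRec]
    apply String.ext; simp [PySem.Chars.join_nil]
  | cons h t ih =>
    intro abs flag
    simp only [List.foldl_cons]
    by_cases hs : PySem.Str.startswith h "#!" = true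
    · have hs' : PySem.Chars.startswith h.toList ['#', '!'] = true := by simpa using hs
      rw [if_pos hs, ih]
      cases ht : pvLastRec t with
      | some j => simp [pvLastRec, ht]
      | none => simp [pvLastRec, ht, hs']
    · have hs' : ¬ PySem.Chars.startswith h.toList ['#', '!'] = true := by simpa using hs
      rw [if_neg hs]
      cases flag with
      | false =>
        simp only [Bool.false_eq_true, if_false]
        rw [ih]
        cases ht : pvLastRec t with
        | some j => simp [pvLastRec, ht]
        | none => simp [pvLastRec, ht, hs']
      | true =>
        simp only [if_true]
        rw [ih]
        cases ht : pvLastRec t with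
        | some j => simp [pvLastRec, ht]
        | none =>
          simp only [pvLastRec, ht, if_true]
          rw [if_neg hs, pvJoinCons]
          apply String.ext; simp

-- ===== VERDICT (by name: the statement is the Claim_ definition above) =====
theorem get_paper_abstract_spec : Claim_equal_get_paper_abstract := by
  intro l _
  unfold Spec_get_paper_abstract get_paper_abstract get_paper_abstract_alt
  rw [pvMain, pvEnumFold]
  cases hl : pvLastRec l with
  | none => simp
  | some j =>
    have hj := pvLastRec_lt l j hl
    simp only [zero_add]
    have h1 : PySem.List.pyGet? l (j : Int) = l[j]? := by
      simp [PySem.List.pyGet?_natCast]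
    have h2 : PySem.List.slice l (some ((j : Int) + 1)) none = l.drop (j + 1) := by
      have he : ((j : Int) + 1).toNat = j + 1 := by omega
      rw [PySem.List.slice_from l (by positivity), he]
    rw [h1, h2]
    simp [List.getD]
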